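-- pv_equiv track=rewrite | github.com/3-manifolds/Spherogram | spherogram_src/codecs/DT.py | unpack_signed_DT
-- ===== SOURCE A (Python) =====
-- def unpack_signed_DT(signed_dt):
--     dt = []
--     component = []
--     flips = []
--     for byte in bytearray(signed_dt):
--         flips.append(bool(byte & 1 << 6))
--         label = (1 + byte & 0x1f) << 1
--         if byte & 1 << 5:
--             label = -label
--         component.append(label)
--         if byte & 1 << 7:
--             dt.append(tuple(component))
--             component = []
--     return dt, flips
-- ===== SOURCE B (Python) =====
-- def _label(b):
--     l = ((1 + b) & 0x1f) << 1
--     return -l if b & 0x20 else l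
--
-- def _split_first(bs):
--     # first flagged byte (bit 7) closes a component; None if no flag remains
--     for i, b in enumerate(bs):
--         if b & 0x80:
--             return bs[:i + 1], bs[i + 1:]
--     return None
--
-- def unpack_signed_DT(signed_dt):
--     bs = list(bytearray(signed_dt))
--     flips = [bool(b & 0x40) for b in bs]
--     dt = []
--     rest = bs
--     while True:
--         s = _split_first(rest)
--         if s is None:
--             break
--         comp, rest = s
--         dt.append(tuple(_label(b) for b in comp))
--     return dt, flips
-- ===== Notes on version B (the rewrite author's own statement) =====
-- stated objective: alternative
-- what changed: Replaces A's single accumulate-and-flush loop with mutable (dt, component, flips) state by independent passes: flips as one list comprehension, and components by repeatedly splitting the byte list at the first flagged byte (bit 7) and mapping the label decoder over each slice.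
import Mathlib
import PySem

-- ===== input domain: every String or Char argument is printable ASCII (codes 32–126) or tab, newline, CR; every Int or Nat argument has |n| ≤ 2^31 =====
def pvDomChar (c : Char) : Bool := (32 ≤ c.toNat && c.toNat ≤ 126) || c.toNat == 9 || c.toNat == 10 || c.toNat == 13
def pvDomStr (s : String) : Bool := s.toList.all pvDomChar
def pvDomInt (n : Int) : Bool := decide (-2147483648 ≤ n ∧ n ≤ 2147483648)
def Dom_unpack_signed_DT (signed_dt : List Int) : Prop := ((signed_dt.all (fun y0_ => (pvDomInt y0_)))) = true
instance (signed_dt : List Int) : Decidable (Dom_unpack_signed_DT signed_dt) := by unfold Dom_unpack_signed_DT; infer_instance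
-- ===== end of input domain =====

-- B replaces A's accumulate-and-flush loop by independent passes: flips by one map,
-- components by repeatedly splitting the byte list at the first flagged byte and mapping
-- the label function over each slice (objective: alternative decomposition, same cost).

-- ===== PORT A =====
-- literal transliteration of A's single loop over bytearray(signed_dt) with state (dt, component, flips)
def unpack_signed_DT (signed_dt : List Int) : List (List Int) × List Bool :=
  let st := signed_dt.foldl
    (fun (st : List (List Int) × List Int × List Bool) byte =>
      let dt := st.1
      let component := st.2.1
      let flips := st.2.2
      let flips := flips ++ [decide (PySem.Int.band byte ((1 : Int) <<< (6 : Nat)) ≠ 0)]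
      let label := (PySem.Int.band (1 + byte) 0x1f) <<< (1 : Nat)
      let label := if PySem.Int.band byte ((1 : Int) <<< (5 : Nat)) ≠ 0 then -label else label
      let component := component ++ [label]
      if PySem.Int.band byte ((1 : Int) <<< (7 : Nat)) ≠ 0 then (dt ++ [component], ([] : List Int), flips)
      else (dt, component, flips))
    ([], [], [])
  (st.1, st.2.2)

-- ===== PORT B =====
-- B's _label
def pvLabel (b : Int) : Int :=
  let l := (PySem.Int.band (1 + b) 0x1f) <<< (1 : Nat)
  if PySem.Int.band b 0x20 ≠ 0 then -l else l

-- B's _split_first: first index with bit 7 set, then the two slices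
def pvSplitFirst (bs : List Int) : Option (List Int × List Int) :=
  match List.findIdx? (fun b => PySem.Int.band b 0x80 != 0) bs with
  | none => none
  | some i => some (bs.take (i + 1), bs.drop (i + 1))

theorem pvSplitFirst_shrink (bs c r : List Int) (h : pvSplitFirst bs = some (c, r)) :
    r.length < bs.length := by
  unfold pvSplitFirst at h
  cases hf : List.findIdx? (fun b => PySem.Int.band b 0x80 != 0) bs with
  | none => simp [hf] at h
  | some i =>
    have hi : i < bs.length := by
      have := List.findIdx?_eq_some_iff_findIdx_eq.mp hf
      omega
    simp [hf] at h
    have : r = bs.drop (i + 1) := h.2.symm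
    subst this
    simp [List.length_drop]
    omega

-- B's while loop: peel components until no flag remains
def pvComps (bs : List Int) : List (List Int) :=
  match h : pvSplitFirst bs with  -- h used by decreasing_by
  | none => []
  | some (c, r) => c.map pvLabel :: pvComps r
termination_by bs.length
decreasing_by exact pvSplitFirst_shrink bs c r h

def unpack_signed_DT_alt (signed_dt : List Int) : List (List Int) × List Bool :=
  let flips := signed_dt.map (fun b => decide (PySem.Int.band b 0x40 ≠ 0))
  (pvComps signed_dt, flips)

-- ===== PRECONDITION & SPEC =====
-- bytearray(signed_dt) raises ValueError unless every entry is in range(256); exactly those inputs are excluded.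
def Pre_unpack_signed_DT (signed_dt : List Int) : Prop :=
  ∀ b ∈ signed_dt, 0 ≤ b ∧ b < 256
instance (signed_dt : List Int) : Decidable (Pre_unpack_signed_DT signed_dt) := by
  unfold Pre_unpack_signed_DT; infer_instance
def pvWitness_unpack_signed_DT : List Int := [4, 133, 37, 230, 96, 255]

def Spec_unpack_signed_DT (signed_dt : List Int) (out : List (List Int) × List Bool) : Prop := out = unpack_signed_DT_alt signed_dt
instance (signed_dt : List Int) (out : List (List Int) × List Bool) : Decidable (Spec_unpack_signed_DT signed_dt out) := by unfold Spec_unpack_signed_DT; infer_instance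

-- ===== CLAIM (what is proved, stated in full; the proofs are below) =====
def Claim_equal_unpack_signed_DT : Prop := ∀ (signed_dt : List Int), Dom_unpack_signed_DT signed_dt → Pre_unpack_signed_DT signed_dt → Spec_unpack_signed_DT signed_dt (unpack_signed_DT signed_dt)

-- ===== LEMMAS AND PROOFS =====

-- the byte-7 flag test, shared shape of both ports after numeral reduction
def pvFlag (b : Int) : Bool := PySem.Int.band b 0x80 != 0

-- A's pending-component recursion, extracted: components closed from a pending prefix of labels
def pvCF (comp : List Int) : List Int → List (List Int)
  | [] => []
  | b :: t => if pvFlag b then (comp ++ [pvLabel b]) :: pvCF [] t else pvCF (comp ++ [pvLabel b]) t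

-- the leftover (never flushed) component
def pvRem (comp : List Int) : List Int → List Int
  | [] => comp
  | b :: t => if pvFlag b then pvRem [] t else pvRem (comp ++ [pvLabel b]) t

theorem pvLoop_char (bs : List Int) : ∀ (st : List (List Int) × List Int × List Bool),
    bs.foldl
      (fun (st : List (List Int) × List Int × List Bool) byte =>
        let dt := st.1
        let component := st.2.1
        let flips := st.2.2
        let flips := flips ++ [decide (PySem.Int.band byte ((1 : Int) <<< (6 : Nat)) ≠ 0)]
        let label := (PySem.Int.band (1 + byte) 0x1f) <<< (1 : Nat)
        let label := if PySem.Int.band byte ((1 : Int) <<< (5 : Nat)) ≠ 0 then -label else label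
        let component := component ++ [label]
        if PySem.Int.band byte ((1 : Int) <<< (7 : Nat)) ≠ 0 then (dt ++ [component], ([] : List Int), flips)
        else (dt, component, flips))
      st
    = (st.1 ++ pvCF st.2.1 bs, pvRem st.2.1 bs,
       st.2.2 ++ bs.map (fun b => decide (PySem.Int.band b 0x40 ≠ 0))) := by
  induction bs with
  | nil => intro st; simp [pvCF, pvRem]
  | cons b t ih =>
    intro st
    rw [List.foldl_cons, ih]
    have h6 : ((1 : Int) <<< (6 : Nat)) = 0x40 := by decide
    have h5 : ((1 : Int) <<< (5 : Nat)) = 0x20 := by decide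
    have h7 : ((1 : Int) <<< (7 : Nat)) = 0x80 := by decide
    by_cases hf : PySem.Int.band b 0x80 ≠ 0
    · simp [pvCF, pvRem, pvFlag, pvLabel, h5, h6, h7, hf]
    · simp only [ne_eq, not_not] at hf
      simp [pvCF, pvRem, pvFlag, pvLabel, h5, h6, h7, hf]

theorem pvCF_eq_split (bs : List Int) : ∀ ls : List Int,
    pvCF ls bs = match pvSplitFirst bs with
      | none => []
      | some (c, r) => (ls ++ c.map pvLabel) :: pvComps r := by
  induction bs with
  | nil => intro ls; simp [pvCF, pvSplitFirst]
  | cons b t ih =>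
    intro ls
    by_cases hf : pvFlag b
    · have hb : (PySem.Int.band b 0x80 != 0) = true := hf
      have hsplit : pvSplitFirst (b :: t) = some ([b], t) := by
        simp [pvSplitFirst, List.findIdx?_cons, hb]
      rw [hsplit]
      have hcomps : pvComps t = pvCF [] t := by
        rw [pvComps, ih]
        cases h : pvSplitFirst t with
        | none => simp
        | some cr => cases cr; simp
      simp [pvCF, hf, hcomps]
    · have hb : (PySem.Int.band b 0x80 != 0) = false := by
        simpa [pvFlag] using hf
      have : pvCF ls (b :: t) = pvCF (ls ++ [pvLabel b]) t := by simp [pvCF, hf]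
      rw [this, ih]
      cases h : pvSplitFirst t with
      | none =>
        have : pvSplitFirst (b :: t) = none := by
          unfold pvSplitFirst at h ⊢
          cases hfi : List.findIdx? (fun b => PySem.Int.band b 0x80 != 0) t with
          | none => simp [List.findIdx?_cons, hb, hfi]
          | some i => simp [hfi] at h
        simp [this]
      | some cr =>
        obtain ⟨c, r⟩ := cr
        unfold pvSplitFirst at h
        cases hfi : List.findIdx? (fun b => PySem.Int.band b 0x80 != 0) t with
        | none => simp [hfi] at h
        | some i =>
          simp [hfi] at h
          have hsplit : pvSplitFirst (b :: t) = some (b :: c, r) := by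
            unfold pvSplitFirst
            simp [List.findIdx?_cons, hb, hfi, ← h.1, ← h.2, List.take_succ_cons, List.drop_succ_cons]
          simp [hsplit]

-- ===== VERDICT (by name: the statement is the Claim_ definition above) =====
theorem unpack_signed_DT_spec : Claim_equal_unpack_signed_DT := by
  intro signed_dt _ _
  unfold Spec_unpack_signed_DT unpack_signed_DT unpack_signed_DT_alt
  rw [pvLoop_char]
  have := pvCF_eq_split signed_dt []
  rw [pvComps]
  cases h : pvSplitFirst signed_dt with
  | none => simp [h] at this ⊢; simp [this]
  | some cr => obtain ⟨c, r⟩ := cr; simp [h] at this ⊢; simp [this]
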